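-- pv_equiv track=rewrite | github.com/thor314/euler-rs-py | e21-30/src/main.py | check_repeats
-- ===== SOURCE A (Python) =====
-- def check_repeats(s):
--     M_SLICE_LEN = 3
--     if len(s) < M_SLICE_LEN +1:
--         return False,0
--     n_chunks = min(10,len(s) - M_SLICE_LEN)
--     for i in range(n_chunks):
--         chunk = s[i:i+M_SLICE_LEN]
--         last_idx = len(s) - M_SLICE_LEN
--         last_chunk = s[last_idx:last_idx+M_SLICE_LEN]
--         if chunk == last_chunk:
--             return True, last_idx
--     return False,0
-- ===== SOURCE B (Python) =====
-- def check_repeats(s):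
--     M_SLICE_LEN = 3
--     if len(s) < M_SLICE_LEN + 1:
--         return False, 0
--     last_idx = len(s) - M_SLICE_LEN
--     last_chunk = s[last_idx:]
--     n_chunks = min(10, last_idx)
--     idx = s.find(last_chunk)
--     return (True, last_idx) if idx < n_chunks else (False, 0)
-- ===== Notes on version B (the rewrite author's own statement) =====
-- stated objective: simpler
-- what changed: Replaces the explicit bounded loop of slice comparisons with a single str.find for the first occurrence of the final 3-char chunk followed by one range check against the chunk bound.
import Mathlib
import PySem

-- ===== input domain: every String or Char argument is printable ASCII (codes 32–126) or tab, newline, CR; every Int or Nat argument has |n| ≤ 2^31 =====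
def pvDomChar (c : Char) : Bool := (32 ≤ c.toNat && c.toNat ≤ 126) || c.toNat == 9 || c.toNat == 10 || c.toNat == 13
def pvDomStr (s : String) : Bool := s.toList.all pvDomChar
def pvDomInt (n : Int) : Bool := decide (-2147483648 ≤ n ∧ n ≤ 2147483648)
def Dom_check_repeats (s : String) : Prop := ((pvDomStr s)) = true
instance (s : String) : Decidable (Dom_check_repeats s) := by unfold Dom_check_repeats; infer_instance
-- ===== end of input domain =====

-- B replaces A's explicit bounded loop of slice comparisons with one str.find plus a range check (simpler).


-- ===== PORT A =====
-- the for-loop over range(n_chunks): returns at the first matching chunk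
def checkRepeatsLoop (cs : List Char) (is : List Int) : Bool × Int :=
  match is with
  | [] => (false, 0)
  | i :: rest =>
    let chunk := PySem.Chars.slice cs (some i) (some (i + 3))
    let lastIdx : Int := (cs.length : Int) - 3
    let lastChunk := PySem.Chars.slice cs (some lastIdx) (some (lastIdx + 3))
    if chunk = lastChunk then (true, lastIdx) else checkRepeatsLoop cs rest

def check_repeats (s : String) : Bool × Int :=
  let cs := s.toList
  if (cs.length : Int) < 3 + 1 then (false, 0)
  else
    let nChunks : Int := min 10 ((cs.length : Int) - 3)
    checkRepeatsLoop cs (PySem.List.pyRange 0 nChunks 1)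

-- ===== PORT B =====
def check_repeats_alt (s : String) : Bool × Int :=
  let cs := s.toList
  if (cs.length : Int) < 3 + 1 then (false, 0)
  else
    let lastIdx : Int := (cs.length : Int) - 3
    let lastChunk := PySem.Chars.slice cs (some lastIdx) none
    let nChunks : Int := min 10 lastIdx
    let idx := PySem.Chars.find cs lastChunk
    if idx < nChunks then (true, lastIdx) else (false, 0)

-- ===== PRECONDITION & SPEC =====
def Spec_check_repeats (s : String) (out : Bool × Int) : Prop := out = check_repeats_alt s
instance (s : String) (out : Bool × Int) : Decidable (Spec_check_repeats s out) := by unfold Spec_check_repeats; infer_instance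

-- ===== CLAIM (what is proved, stated in full; the proofs are below) =====
def Claim_equal_check_repeats : Prop := ∀ (s : String), Dom_check_repeats s → Spec_check_repeats s (check_repeats s)

-- ===== LEMMAS AND PROOFS =====

-- the chunk slice s[len-3:len] is the final 3-char chunk
theorem slice_last_chunk (cs : List Char) (h3 : 3 ≤ cs.length) :
    PySem.Chars.slice cs (some ((cs.length : Int) - 3)) (some ((cs.length : Int) - 3 + 3))
      = cs.drop (cs.length - 3) := by
  have e1 : ((cs.length : Int) - 3) = ((cs.length - 3 : Nat) : Int) := by omega
  rw [e1]
  have e2 : (((cs.length - 3 : Nat) : Int) + 3) = ((cs.length - 3 + 3 : Nat) : Int) := by push_cast; ring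
  rw [e2, PySem.Chars.slice_eq_listSlice, PySem.List.slice_natCast]
  have e3 : cs.length - 3 + 3 - (cs.length - 3) = 3 := by omega
  rw [e3]
  apply List.take_of_length_le
  simp
  omega

-- A's loop over indices a, a+1, …, a+m-1 returns (true, len-3) iff some chunk there equals the final chunk
theorem checkRepeatsLoop_range (cs : List Char) (h3 : 3 ≤ cs.length) (a m : Nat) :
    checkRepeatsLoop cs ((List.range m).map (fun k => ((a + k : Nat) : Int))) =
      (if ∃ i < a + m, a ≤ i ∧ (cs.drop i).take 3 = cs.drop (cs.length - 3) then
        (true, (cs.length : Int) - 3) else (false, 0)) := by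
  induction m generalizing a with
  | zero =>
    rw [List.range_zero, List.map_nil, checkRepeatsLoop, if_neg]
    rintro ⟨i, h1, h2, -⟩; omega
  | succ m ih =>
    rw [List.range_succ_eq_map]
    simp only [List.map_cons, List.map_map]
    have hmap : ((List.range m).map ((fun k => ((a + k : Nat) : Int)) ∘ (· + 1)))
        = (List.range m).map (fun k => (((a + 1) + k : Nat) : Int)) := by
      apply List.map_congr_left; intro x _; simp; omega
    rw [hmap, checkRepeatsLoop]
    have hchunk : PySem.Chars.slice cs (some ((a + 0 : Nat) : Int)) (some (((a + 0 : Nat) : Int) + 3))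
        = (cs.drop a).take 3 := by
      have e : (((a + 0 : Nat) : Int) + 3) = (((a + 0) + 3 : Nat) : Int) := by push_cast; ring
      rw [e, PySem.Chars.slice_eq_listSlice, PySem.List.slice_natCast]
      congr 1
      omega
    simp only [hchunk, slice_last_chunk cs h3]
    by_cases hm : (cs.drop a).take 3 = cs.drop (cs.length - 3)
    · rw [if_pos hm, if_pos ⟨a, by omega, le_refl a, hm⟩]
    · rw [if_neg hm, ih (a + 1)]
      congr 1
      simp only [eq_iff_iff]
      constructor
      · rintro ⟨i, h1, h2, h3'⟩; exact ⟨i, by omega, by omega, h3'⟩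
      · rintro ⟨i, h1, h2, h3'⟩
        rcases Nat.eq_or_lt_of_le h2 with rfl | hlt
        · exact absurd h3' hm
        · exact ⟨i, by omega, by omega, h3'⟩

-- the final 3-char chunk is a prefix of cs.drop i iff the chunk at i equals it
theorem prefix_iff_take3 (cs : List Char) (h3 : 3 ≤ cs.length) (i : Nat) :
    cs.drop (cs.length - 3) <+: cs.drop i ↔ (cs.drop i).take 3 = cs.drop (cs.length - 3) := by
  have hlen : (cs.drop (cs.length - 3)).length = 3 := by simp; omega
  rw [List.prefix_iff_eq_take, hlen, eq_comm]

theorem check_repeats_spec : Claim_equal_check_repeats := by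
  intro s _
  unfold Spec_check_repeats check_repeats check_repeats_alt
  set cs := s.toList with hcs
  by_cases hlen : (cs.length : Int) < 3 + 1
  · simp only [if_pos hlen]
  · simp only [if_neg hlen]
    have h3 : 3 ≤ cs.length := by omega
    set L := cs.drop (cs.length - 3) with hL
    have hsliceB : PySem.Chars.slice cs (some ((cs.length : Int) - 3)) none = L := by
      have h0 : (0 : Int) ≤ (cs.length : Int) - 3 := by omega
      rw [PySem.Chars.slice_eq_listSlice, PySem.List.slice_from cs h0]
      rw [hL]; congr 1; omega
    rw [hsliceB]
    -- rewrite A's range to the Nat form used by checkRepeatsLoop_range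
    have hrange : PySem.List.pyRange 0 (min 10 ((cs.length : Int) - 3)) 1
        = (List.range (min 10 (cs.length - 3))).map (fun k => ((0 + k : Nat) : Int)) := by
      rw [PySem.List.pyRange_one]
      have e : ((min 10 ((cs.length : Int) - 3)) - 0).toNat = min 10 (cs.length - 3) := by omega
      rw [e]
      apply List.map_congr_left; intro x _; simp
    rw [hrange, checkRepeatsLoop_range cs h3 0 (min 10 (cs.length - 3))]
    -- B's find: points at the first occurrence of L
    have hinf : L <:+: cs := (List.drop_suffix _ _).isInfix
    have hfnn : 0 ≤ PySem.Chars.find cs L := (PySem.Chars.find_nonneg_iff cs L).mpr hinf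
    obtain ⟨hpre, hmin⟩ := PySem.Chars.find_spec hfnn
    set f := PySem.Chars.find cs L with hf
    have hiff : (∃ i < 0 + min 10 (cs.length - 3), 0 ≤ i ∧ (cs.drop i).take 3 = L)
        ↔ f < min 10 ((cs.length : Int) - 3) := by
      constructor
      · rintro ⟨i, hi, -, hmatch⟩
        have hpi : L <+: cs.drop i := (prefix_iff_take3 cs h3 i).mpr hmatch
        have : ¬ i < f.toNat := fun hlt => hmin i hlt hpi
        omega
      · intro hflt
        refine ⟨f.toNat, by omega, Nat.zero_le _, ?_⟩
        exact (prefix_iff_take3 cs h3 f.toNat).mp hpre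
    by_cases hc : f < min 10 ((cs.length : Int) - 3)
    · rw [if_pos (hiff.mpr hc), if_pos hc]
    · rw [if_neg (fun h => hc (hiff.mp h)), if_neg hc]
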